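-- pv_equiv track=rewrite | github.com/AI-Prompt-Ops-Kitchen/ndninja-home | scripts/ninja_content.py | extract_topic_from_script
-- ===== SOURCE A (Python) =====
-- def extract_topic_from_script(script_text: str) -> str:
--     """Extract the actual topic/news from a script, skipping intro and outro."""
--     lines = script_text.strip().split('\n')
--
--     # Skip intro patterns (first 1-2 sentences usually)
--     intro_patterns = [
--         "what's up", "hey ninja", "fellow ninja", "neurodivergent ninja here",
--         "back with another", "quick update", "let's dive", "welcome back"
--     ]
--     outro_patterns = [
--         "thanks for watching", "like, follow", "subscribe", "signing off",
--         "see you in", "next video", "don't forget to"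
--     ]
--
--     # Find the content section (skip intro, stop before outro)
--     content_sentences = []
--     for line in lines:
--         line_lower = line.lower()
--         # Skip intro lines
--         if any(p in line_lower for p in intro_patterns):
--             continue
--         # Stop at outro lines
--         if any(p in line_lower for p in outro_patterns):
--             break
--         if line.strip():
--             content_sentences.append(line.strip())
--
--     # Get the first meaningful content sentence (the topic)
--     if content_sentences:
--         # Take first 1-2 sentences that describe the news
--         topic = ' '.join(content_sentences[:2])
--         # Limit length but keep it descriptive
--         if len(topic) > 150:
--             topic = topic[:150].rsplit(' ', 1)[0] + '...'
--         return topic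
--
--     # Fallback: use middle portion of script
--     return script_text[100:250] if len(script_text) > 250 else script_text
-- ===== SOURCE B (Python) =====
-- def extract_topic_from_script(script_text: str) -> str:
--     """Extract the actual topic/news from a script, skipping intro and outro."""
--     intro_patterns = [
--         "what's up", "hey ninja", "fellow ninja", "neurodivergent ninja here",
--         "back with another", "quick update", "let's dive", "welcome back"
--     ]
--     outro_patterns = [
--         "thanks for watching", "like, follow", "subscribe", "signing off",
--         "see you in", "next video", "don't forget to"
--     ]
--
--     def is_intro(line):
--         ll = line.lower()
--         return any(p in ll for p in intro_patterns)
--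
--     def is_outro(line):
--         ll = line.lower()
--         return any(p in ll for p in outro_patterns)
--
--     lines = script_text.strip().split('\n')
--
--     # Pass 1: locate the boundary — the first line that reads as outro
--     # but not as intro (intro wins, matching A's branch order).
--     boundary = len(lines)
--     for i, line in enumerate(lines):
--         if is_outro(line) and not is_intro(line):
--             boundary = i
--             break
--
--     # Pass 2: filter the pre-boundary lines.
--     content_sentences = [line.strip() for line in lines[:boundary]
--                          if not is_intro(line) and line.strip()]
--
--     if content_sentences:
--         topic = ' '.join(content_sentences[:2])
--         if len(topic) > 150:
--             topic = topic[:150].rsplit(' ', 1)[0] + '...'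
--         return topic
--
--     return script_text[100:250] if len(script_text) > 250 else script_text
-- ===== Notes on version B (the rewrite author's own statement) =====
-- stated objective: alternative
-- what changed: A's single fused scan with skip/break/collect is split into a boundary-location pass (first outro-and-not-intro line) followed by a declarative filter comprehension over the lines before the boundary.
import Mathlib
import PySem

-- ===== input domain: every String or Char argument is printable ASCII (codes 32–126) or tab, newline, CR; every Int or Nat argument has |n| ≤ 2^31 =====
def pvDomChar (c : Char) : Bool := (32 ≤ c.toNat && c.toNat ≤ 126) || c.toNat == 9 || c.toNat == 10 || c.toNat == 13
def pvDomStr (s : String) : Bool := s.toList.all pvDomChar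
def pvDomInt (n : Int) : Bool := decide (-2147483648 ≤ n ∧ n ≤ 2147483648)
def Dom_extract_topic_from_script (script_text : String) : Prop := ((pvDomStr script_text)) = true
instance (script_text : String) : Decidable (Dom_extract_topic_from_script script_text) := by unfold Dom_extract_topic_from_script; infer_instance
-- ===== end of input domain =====

-- B splits A's fused skip/break/collect scan into a boundary-location pass plus a
-- filter comprehension over the pre-boundary lines (objective: alternative decomposition).
-- A mutates nothing; equivalence is about the return value.

-- pattern lists shared by both Pythons verbatim
def pvIntroPatterns : List String :=
  ["what's up", "hey ninja", "fellow ninja", "neurodivergent ninja here",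
   "back with another", "quick update", "let's dive", "welcome back"]

def pvOutroPatterns : List String :=
  ["thanks for watching", "like, follow", "subscribe", "signing off",
   "see you in", "next video", "don't forget to"]

-- shared final section of both Pythons: join, 150-char truncation, fallback slice
-- (t[:150].rsplit(' ', 1)[0] is t up to the last space of t[:150] — exact, since
-- rsplit(sep, 1)[0] is everything before the last occurrence, or the whole string)
def pvRsplitHead (t : String) : String :=
  let i := PySem.Str.rfind t " "
  if i = -1 then t else PySem.Str.slice t none (some i)

def pvFinish (script_text : String) (content_sentences : List String) : String :=
  if content_sentences ≠ [] then
    let topic := PySem.Str.join " " (PySem.List.slice content_sentences none (some 2))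
    if 150 < PySem.Str.len topic then
      PySem.Str.join "" [pvRsplitHead (PySem.Str.slice topic none (some 150)), "..."]
    else topic
  else if 250 < PySem.Str.len script_text then
    PySem.Str.slice script_text (some 100) (some 250)
  else script_text

-- ===== PORT A =====
-- A's single loop: skip intro lines, break at outro lines, collect stripped nonblanks
def pvALoop : List String → List String → List String
  | [], acc => acc
  | line :: rest, acc =>
    let line_lower := PySem.Str.lower line
    if pvIntroPatterns.any (fun p => PySem.Str.isIn p line_lower) then
      pvALoop rest acc
    else if pvOutroPatterns.any (fun p => PySem.Str.isIn p line_lower) then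
      acc
    else if PySem.Str.strip line ≠ "" then
      pvALoop rest (acc ++ [PySem.Str.strip line])
    else
      pvALoop rest acc

def extract_topic_from_script (script_text : String) : String :=
  let lines := (PySem.Str.split? (PySem.Str.strip script_text) "\n").getD []
  pvFinish script_text (pvALoop lines [])

-- ===== PORT B =====
def pvIsIntro (line : String) : Bool :=
  pvIntroPatterns.any (fun p => PySem.Str.isIn p (PySem.Str.lower line))

def pvIsOutro (line : String) : Bool :=
  pvOutroPatterns.any (fun p => PySem.Str.isIn p (PySem.Str.lower line))

-- pass 1: index of the first line that is outro and not intro (default: length)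
def pvBoundary : List String → Nat
  | [] => 0
  | line :: rest =>
    if pvIsOutro line && !pvIsIntro line then 0 else pvBoundary rest + 1

def extract_topic_from_script_alt (script_text : String) : String :=
  let lines := (PySem.Str.split? (PySem.Str.strip script_text) "\n").getD []
  -- pass 2: filter comprehension over lines[:boundary]
  let content_sentences :=
    ((lines.take (pvBoundary lines)).filter
      (fun line => !pvIsIntro line && PySem.Str.strip line != "")).map PySem.Str.strip
  pvFinish script_text content_sentences

-- ===== PRECONDITION & SPEC =====
def Spec_extract_topic_from_script (script_text : String) (out : String) : Prop := out = extract_topic_from_script_alt script_text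
instance (script_text : String) (out : String) : Decidable (Spec_extract_topic_from_script script_text out) := by unfold Spec_extract_topic_from_script; infer_instance

-- ===== CLAIM (what is proved, stated in full; the proofs are below) =====
def Claim_equal_extract_topic_from_script : Prop := ∀ (script_text : String), Dom_extract_topic_from_script script_text → Spec_extract_topic_from_script script_text (extract_topic_from_script script_text)

-- ===== LEMMAS AND PROOFS =====

-- A's fused loop equals B's boundary-then-filter pipeline, with the accumulator in front.
theorem pvALoop_eq (lines acc : List String) :
    pvALoop lines acc =
      acc ++ ((lines.take (pvBoundary lines)).filter
        (fun line => !pvIsIntro line && PySem.Str.strip line != "")).map PySem.Str.strip := by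
  induction lines generalizing acc with
  | nil => simp [pvALoop, pvBoundary]
  | cons line rest ih =>
    by_cases hi : pvIsIntro line = true
    · have hb : pvBoundary (line :: rest) = pvBoundary rest + 1 := by
        simp [pvBoundary, hi]
      have hA : pvALoop (line :: rest) acc = pvALoop rest acc := by
        simp only [pvALoop]
        rw [if_pos (by simpa [pvIsIntro] using hi)]
      rw [hA, hb, List.take_succ_cons, List.filter_cons_of_neg (by simp [hi]), ih]
    · by_cases ho : pvIsOutro line = true
      · have hb : pvBoundary (line :: rest) = 0 := by simp [pvBoundary, hi, ho]
        have hA : pvALoop (line :: rest) acc = acc := by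
          simp only [pvALoop]
          rw [if_neg (by simpa [pvIsIntro] using hi), if_pos (by simpa [pvIsOutro] using ho)]
        rw [hA, hb]
        simp
      · have hb : pvBoundary (line :: rest) = pvBoundary rest + 1 := by
          simp [pvBoundary, hi, ho]
        rw [hb, List.take_succ_cons]
        by_cases hs : PySem.Str.strip line ≠ ""
        · have hA : pvALoop (line :: rest) acc = pvALoop rest (acc ++ [PySem.Str.strip line]) := by
            simp only [pvALoop]
            rw [if_neg (by simpa [pvIsIntro] using hi), if_neg (by simpa [pvIsOutro] using ho),
               if_pos hs]
          rw [hA, List.filter_cons_of_pos (by simp [hi, hs]), ih]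
          simp
        · have hA : pvALoop (line :: rest) acc = pvALoop rest acc := by
            simp only [pvALoop]
            rw [if_neg (by simpa [pvIsIntro] using hi), if_neg (by simpa [pvIsOutro] using ho),
               if_neg hs]
          rw [hA, List.filter_cons_of_neg (by simp at hs; simp [hi, hs]), ih]

-- ===== VERDICT (by name: the statement is the Claim_ definition above) =====
theorem extract_topic_from_script_spec : Claim_equal_extract_topic_from_script := by
  intro s _
  unfold Spec_extract_topic_from_script extract_topic_from_script extract_topic_from_script_alt
  simp only [pvALoop_eq, List.nil_append]
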